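-- pv_equiv track=rewrite | github.com/hojoungjang/programming-exercises | 3109-빵집/solution.py | solution
-- ===== SOURCE A (Python) =====
-- BLOCKED = "x"
--
-- def solution(rows, cols, grid):
--
--     def dfs(r, c):
--         grid[r][c] = BLOCKED
--
--         if c == cols - 1:
--             return 1
--
--         cnt = 0
--         for dr in [-1, 0, 1]:
--             new_r = r + dr
--             if new_r < 0 or new_r >= rows:
--                 continue
--
--             if grid[new_r][c+1] == BLOCKED:
--                 continue
--
--             if dfs(new_r, c + 1):
--                 return 1
--
--         return 0
--
--     cnt = 0
--     for r in range(rows):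
--         cnt += dfs(r=r, c=0)
--     return cnt
-- ===== SOURCE B (Python) =====
-- BLOCKED = "x"
--
-- def solution(rows, cols, grid):
--     # Iterative explicit-stack DFS (same greedy marking discipline as the
--     # recursive original: mark on pop, neighbours pushed in reverse priority
--     # order so the up-neighbour is explored first, first success aborts the
--     # search for this start row; blocked marks persist across start rows).
--     # Mutates grid in place, like the original.
--     cnt = 0
--     for r in range(rows):
--         stack = [(r, 0)]
--         found = 0
--         while stack:
--             cr, cc = stack.pop()
--             grid[cr][cc] = BLOCKED
--             if cc == cols - 1:
--                 found = 1
--                 break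
--             for nr in (cr + 1, cr, cr - 1):
--                 if 0 <= nr < rows and grid[nr][cc + 1] != BLOCKED:
--                     stack.append((nr, cc + 1))
--         cnt += found
--     return cnt
-- ===== Notes on version B (the rewrite author's own statement) =====
-- stated objective: alternative
-- what changed: A's recursive backtracking dfs with early return is replaced by an explicit-stack iterative DFS per start row: pop-and-mark, push the eligible column-c+1 neighbours in reverse priority order so the up-neighbour is explored first, abandon the stack on reaching the last column; the persistent blocked marks carry over between start rows exactly as in A.
-- outside the precondition, e.g. on solution(1, 0, [['x', 'x']]): A returns 0, B returns 0
import Mathlib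
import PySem

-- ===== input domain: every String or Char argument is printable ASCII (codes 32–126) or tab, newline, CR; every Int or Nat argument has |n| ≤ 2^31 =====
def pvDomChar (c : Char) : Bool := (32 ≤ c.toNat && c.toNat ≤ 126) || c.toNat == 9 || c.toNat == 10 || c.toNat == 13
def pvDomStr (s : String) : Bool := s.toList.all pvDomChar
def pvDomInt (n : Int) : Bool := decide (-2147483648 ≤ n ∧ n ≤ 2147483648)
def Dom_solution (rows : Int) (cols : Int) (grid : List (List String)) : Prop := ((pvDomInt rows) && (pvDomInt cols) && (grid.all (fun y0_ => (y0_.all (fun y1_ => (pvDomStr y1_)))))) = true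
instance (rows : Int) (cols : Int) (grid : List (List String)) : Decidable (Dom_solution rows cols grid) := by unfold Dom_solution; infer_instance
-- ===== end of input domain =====

-- B replaces A's recursive backtracking dfs by an explicit-stack iterative DFS with the same
-- greedy marking discipline (an alternative decomposition of the same cost); both A and B
-- mutate the Python grid in place identically — the equivalence proved here is about the
-- return value.

-- grid cell read/write grid[r][c]: exact for the in-range nonnegative indices reached under Pre_
def gget (g : List (List String)) (r c : Int) : String := (g.getD r.toNat []).getD c.toNat ""
def gset (g : List (List String)) (r c : Int) (v : String) : List (List String) :=
  g.modify r.toNat (fun row => row.set c.toNat v)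

-- ===== PORT A =====
-- dfsA = A's dfs, goA = its `for dr in [-1, 0, 1]` loop with early return, threading the
-- mutated grid; fuel is only a totality device: it equals cols-1-c on every call reached
-- under Pre_, and the fuel-0 arm is exactly the c == cols-1 base case already returned before it
mutual
def dfsA (rows cols : Int) (r c : Int) (g : List (List String)) (fuel : Nat) :
    Int × List (List String) :=
  let g1 := gset g r c "x"
  if c = cols - 1 then (1, g1)
  else
    match fuel with
    | 0 => (0, g1)
    | Nat.succ f => goA rows cols r c [-1, 0, 1] g1 f
termination_by (fuel, 0)

def goA (rows cols : Int) (r c : Int) (drs : List Int) (g : List (List String)) (f : Nat) :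
    Int × List (List String) :=
  match drs with
  | [] => (0, g)
  | dr :: rest =>
    let nr := r + dr
    if nr < 0 ∨ rows ≤ nr then goA rows cols r c rest g f
    else if gget g nr (c + 1) = "x" then goA rows cols r c rest g f
    else
      let p := dfsA rows cols nr (c + 1) g f
      if p.1 ≠ 0 then (1, p.2) else goA rows cols r c rest p.2 f
termination_by (f, drs.length + 1)
end

def solution (rows : Int) (cols : Int) (grid : List (List String)) : Int :=
  ((PySem.List.pyRange 0 rows 1).foldl
    (fun (st : Int × List (List String)) r =>
      let p := dfsA rows cols r 0 st.2 ((cols - 1).toNat)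
      (st.1 + p.1, p.2))
    (0, grid)).1

-- ===== PORT B =====
-- Source B's while-stack loop; the list head is the stack top (Source B pushes cr+1, cr, cr-1 and
-- pops from the end, i.e. the frames (cr-1,·), (cr,·), (cr+1,·) are prepended in that order);
-- fuel bounds the number of pops, a totality device only (4^(cols-1) pops are proved
-- sufficient under Pre_)
def runB (rows cols : Int) (stack : List (Int × Int)) (g : List (List String)) (fuel : Nat) :
    Int × List (List String) :=
  match fuel, stack with
  | _, [] => (0, g)
  | 0, _ => (0, g)
  | Nat.succ f, (r, c) :: rest =>
    let g1 := gset g r c "x"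
    if c = cols - 1 then (1, g1)
    else
      let nbrs := [r - 1, r, r + 1].filterMap
        (fun nr => if 0 ≤ nr ∧ nr < rows ∧ gget g1 nr (c + 1) ≠ "x" then some (nr, c + 1) else none)
      runB rows cols (nbrs ++ rest) g1 f

def solution_alt (rows : Int) (cols : Int) (grid : List (List String)) : Int :=
  ((PySem.List.pyRange 0 rows 1).foldl
    (fun (st : Int × List (List String)) r =>
      let p := runB rows cols [(r, 0)] st.2 (4 ^ (cols - 1).toNat)
      (st.1 + p.1, p.2))
    (0, grid)).1

-- ===== PRECONDITION & SPEC =====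
-- Pre_ excludes shapes on which the DFS indexes off the grid (rows exceeding len(grid), a
-- touched row shorter than cols, or cols < 1 with rows > 0): there Python A raises
-- IndexError, except on degenerate already-blocked grids where both programs return the
-- same value anyway.
def Pre_solution (rows : Int) (cols : Int) (grid : List (List String)) : Prop :=
  0 < rows → (1 ≤ cols ∧ rows ≤ (grid.length : Int) ∧
    ∀ row ∈ grid.take rows.toNat, cols ≤ (row.length : Int))
instance (rows : Int) (cols : Int) (grid : List (List String)) : Decidable (Pre_solution rows cols grid) := by unfold Pre_solution; infer_instance

def pvWitness_solution : Int × Int × List (List String) := (2, 2, [["a", "a"], ["a", "a"]])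

def Spec_solution (rows : Int) (cols : Int) (grid : List (List String)) (out : Int) : Prop := out = solution_alt rows cols grid
instance (rows : Int) (cols : Int) (grid : List (List String)) (out : Int) : Decidable (Spec_solution rows cols grid out) := by unfold Spec_solution; infer_instance

-- ===== CLAIM (what is proved, stated in full; the proofs are below) =====
def Claim_equal_solution : Prop := ∀ (rows : Int) (cols : Int) (grid : List (List String)), Dom_solution rows cols grid → Pre_solution rows cols grid → Spec_solution rows cols grid (solution rows cols grid)

-- ===== LEMMAS AND PROOFS =====

theorem gget_gset_ne (g : List (List String)) (r c : Int) (v : String) (r2 c2 : Int)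
    (h : r2.toNat ≠ r.toNat ∨ c2.toNat ≠ c.toNat) :
    gget (gset g r c v) r2 c2 = gget g r2 c2 := by
  unfold gget gset
  simp only [List.getD_eq_getElem?_getD, List.getElem?_modify]
  cases e : g[r2.toNat]? with
  | none => simp
  | some row =>
    simp only [Option.map_eq_map, Option.map_some, Option.getD_some]
    rcases h with h | h
    · rw [if_neg (by omega)]
    · split
      · simp only [List.getElem?_set, if_neg (show ¬ c.toNat = c2.toNat by omega)]
      · rfl

theorem go01 (rows cols : Int) (f : Nat) :
    ∀ r c drs g, (goA rows cols r c drs g f).1 = 0 ∨ (goA rows cols r c drs g f).1 = 1 := by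
  intro r c drs
  induction drs with
  | nil => intro g; rw [goA]; left; rfl
  | cons dr rest ih =>
    intro g
    rw [goA]; simp only []
    split
    · exact ih g
    · split
      · exact ih g
      · split
        · right; rfl
        · exact ih _

theorem dfsA_01 (rows cols : Int) (f : Nat) :
    ∀ r c g, (dfsA rows cols r c g f).1 = 0 ∨ (dfsA rows cols r c g f).1 = 1 := by
  intro r c g
  cases f with
  | zero =>
    rw [dfsA]
    split
    · right; rfl
    · left; rfl
  | succ f =>
    rw [dfsA]
    split
    · right; rfl
    · exact go01 rows cols f r c _ _

theorem go_untouched (rows cols : Int) (f : Nat)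
    (hd : ∀ r c g r2 c2, 0 ≤ r → 0 ≤ c → 0 ≤ r2 → 0 ≤ c2 →
      (c2 < c ∨ (c2 = c ∧ r2 ≠ r)) →
      gget (dfsA rows cols r c g f).2 r2 c2 = gget g r2 c2) :
    ∀ r c drs g r2 c2, 0 ≤ c → 0 ≤ r2 → 0 ≤ c2 → c2 ≤ c →
      gget (goA rows cols r c drs g f).2 r2 c2 = gget g r2 c2 := by
  intro r c drs
  induction drs with
  | nil => intro g r2 c2 _ _ _ _; rw [goA]
  | cons dr rest ih =>
    intro g r2 c2 hc hr2 hc2 hle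
    rw [goA]; simp only []
    split
    · exact ih g r2 c2 hc hr2 hc2 hle
    · split
      · exact ih g r2 c2 hc hr2 hc2 hle
      · rename_i hrange _
        have hnr : 0 ≤ r + dr := by omega
        have hstep : gget (dfsA rows cols (r + dr) (c + 1) g f).2 r2 c2 = gget g r2 c2 :=
          hd (r + dr) (c + 1) g r2 c2 hnr (by omega) hr2 hc2 (Or.inl (by omega))
        split
        · exact hstep
        · rw [ih _ r2 c2 hc hr2 hc2 hle, hstep]

theorem dfsA_untouched (rows cols : Int) (f : Nat) :
    (∀ r c g r2 c2, 0 ≤ r → 0 ≤ c → 0 ≤ r2 → 0 ≤ c2 →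
      (c2 < c ∨ (c2 = c ∧ r2 ≠ r)) →
      gget (dfsA rows cols r c g f).2 r2 c2 = gget g r2 c2) ∧
    (∀ r c drs g r2 c2, 0 ≤ c → 0 ≤ r2 → 0 ≤ c2 → c2 ≤ c →
      gget (goA rows cols r c drs g f).2 r2 c2 = gget g r2 c2) := by
  induction f with
  | zero =>
    have hd : ∀ r c g r2 c2, 0 ≤ r → 0 ≤ c → 0 ≤ r2 → 0 ≤ c2 →
        (c2 < c ∨ (c2 = c ∧ r2 ≠ r)) →
        gget (dfsA rows cols r c g 0).2 r2 c2 = gget g r2 c2 := by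
      intro r c g r2 c2 hr hc hr2 hc2 hne
      rw [dfsA]
      have : gget (gset g r c "x") r2 c2 = gget g r2 c2 :=
        gget_gset_ne g r c "x" r2 c2 (by omega)
      split
      · exact this
      · exact this
    exact ⟨hd, go_untouched rows cols 0 hd⟩
  | succ f ihf =>
    have hd : ∀ r c g r2 c2, 0 ≤ r → 0 ≤ c → 0 ≤ r2 → 0 ≤ c2 →
        (c2 < c ∨ (c2 = c ∧ r2 ≠ r)) →
        gget (dfsA rows cols r c g (f+1)).2 r2 c2 = gget g r2 c2 := by
      intro r c g r2 c2 hr hc hr2 hc2 hne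
      rw [dfsA]
      have hset : gget (gset g r c "x") r2 c2 = gget g r2 c2 :=
        gget_gset_ne g r c "x" r2 c2 (by omega)
      split
      · exact hset
      · rw [go_untouched rows cols f ihf.1 r c [-1, 0, 1] (gset g r c "x") r2 c2 hc hr2 hc2
          (by omega), hset]
    exact ⟨hd, go_untouched rows cols (f+1) hd⟩

theorem runB_go_sim (rows cols : Int) (f : Nat)
    (hd : ∀ (r c : Int) (g : List (List String)) (rest : List (Int × Int)),
      0 ≤ r → 0 ≤ c → c ≤ cols - 1 → (f : Int) = cols - 1 - c →
      ∃ n ≤ 4 ^ f, ∀ F,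
        runB rows cols ((r, c) :: rest) g (n + F) =
          (if (dfsA rows cols r c g f).1 ≠ 0 then (1, (dfsA rows cols r c g f).2)
           else runB rows cols rest (dfsA rows cols r c g f).2 F)) :
    ∀ (drs : List Int) (r c : Int) (g : List (List String)) (rest : List (Int × Int)),
      drs.Nodup → 0 ≤ c → c < cols - 1 → (f : Int) = cols - 1 - (c + 1) →
      ∃ n ≤ drs.length * 4 ^ f, ∀ F,
        runB rows cols ((drs.filterMap (fun dr =>
            if 0 ≤ r + dr ∧ r + dr < rows ∧ gget g (r + dr) (c + 1) ≠ "x"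
            then some (r + dr, c + 1) else none)) ++ rest) g (n + F) =
          (if (goA rows cols r c drs g f).1 ≠ 0 then (1, (goA rows cols r c drs g f).2)
           else runB rows cols rest (goA rows cols r c drs g f).2 F) := by
  intro drs
  induction drs with
  | nil =>
    intro r c g rest _ _ _ _
    refine ⟨0, Nat.zero_le _, fun F => ?_⟩
    rw [goA]
    simp
  | cons dr rest' ih =>
    intro r c g rest hnd hc hclt hf
    by_cases hP : 0 ≤ r + dr ∧ r + dr < rows ∧ gget g (r + dr) (c + 1) ≠ "x"
    · -- eligible head: it is popped next; its whole dfs subtree runs first (IH hd),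
      -- after which the eligibility of the remaining frames is unchanged (dfsA_untouched)
      have hr1 : ¬(r + dr < 0 ∨ rows ≤ r + dr) := by omega
      have hr2 : ¬(gget g (r + dr) (c + 1) = "x") := hP.2.2
      have hgo_eq : goA rows cols r c (dr :: rest') g f =
          (if (dfsA rows cols (r + dr) (c + 1) g f).1 ≠ 0
           then (1, (dfsA rows cols (r + dr) (c + 1) g f).2)
           else goA rows cols r c rest' (dfsA rows cols (r + dr) (c + 1) g f).2 f) := by
        rw [goA]; simp only []
        rw [if_neg hr1, if_neg hr2]
      obtain ⟨n1, hn1, H1⟩ := hd (r + dr) (c + 1) g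
        ((rest'.filterMap (fun dr' =>
            if 0 ≤ r + dr' ∧ r + dr' < rows ∧ gget g (r + dr') (c + 1) ≠ "x"
            then some (r + dr', c + 1) else none)) ++ rest)
        hP.1 (by omega) (by omega) (by omega)
      obtain ⟨n2, hn2, H2⟩ := ih (r := r) (c := c)
        ((dfsA rows cols (r + dr) (c + 1) g f).2) rest hnd.of_cons hc hclt hf
      have hfm : rest'.filterMap (fun dr' =>
            if 0 ≤ r + dr' ∧ r + dr' < rows ∧
                gget (dfsA rows cols (r + dr) (c + 1) g f).2 (r + dr') (c + 1) ≠ "x"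
            then some (r + dr', c + 1) else none)
          = rest'.filterMap (fun dr' =>
            if 0 ≤ r + dr' ∧ r + dr' < rows ∧ gget g (r + dr') (c + 1) ≠ "x"
            then some (r + dr', c + 1) else none) := by
        apply List.filterMap_congr
        intro dr' hmem
        have hne : dr' ≠ dr := by
          intro e; exact (List.nodup_cons.mp hnd).1 (e ▸ hmem)
        by_cases hrange : 0 ≤ r + dr' ∧ r + dr' < rows
        · have : gget (dfsA rows cols (r + dr) (c + 1) g f).2 (r + dr') (c + 1)
              = gget g (r + dr') (c + 1) :=
            (dfsA_untouched rows cols f).1 (r + dr) (c + 1) g (r + dr') (c + 1)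
              hP.1 (by omega) hrange.1 (by omega) (Or.inr ⟨rfl, by omega⟩)
          rw [this]
        · rw [if_neg (by tauto), if_neg (by tauto)]
      rw [hfm] at H2
      refine ⟨n1 + n2, by
        calc n1 + n2 ≤ 4 ^ f + rest'.length * 4 ^ f := Nat.add_le_add hn1 hn2
        _ = (dr :: rest').length * 4 ^ f := by simp [Nat.succ_mul, Nat.add_comm], fun F => ?_⟩
      rw [List.filterMap_cons, if_pos hP,
        show n1 + n2 + F = n1 + (n2 + F) by omega, List.cons_append, H1, hgo_eq]
      by_cases hp1 : (dfsA rows cols (r + dr) (c + 1) g f).1 = 0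
      · simpa [hp1] using H2 F
      · simp [hp1]
    · -- ineligible head: neither program touches it
      have hgo_eq : goA rows cols r c (dr :: rest') g f = goA rows cols r c rest' g f := by
        rw [goA]; simp only []
        by_cases hrange : r + dr < 0 ∨ rows ≤ r + dr
        · rw [if_pos hrange]
        · rw [if_neg hrange, if_pos (by
            by_contra hx
            exact hP ⟨by omega, by omega, hx⟩)]
      obtain ⟨n, hn, H⟩ := ih (r := r) (c := c) g rest hnd.of_cons hc hclt hf
      refine ⟨n, le_trans hn (by simp [Nat.succ_mul]), fun F => ?_⟩
      rw [List.filterMap_cons, if_neg hP, H F, hgo_eq]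

theorem runB_nil (rows cols : Int) (g : List (List String)) (F : Nat) :
    runB rows cols [] g F = (0, g) := by
  cases F <;> rfl

theorem runB_sim (rows cols : Int) : ∀ f : Nat,
    ∀ (r c : Int) (g : List (List String)) (rest : List (Int × Int)),
      0 ≤ r → 0 ≤ c → c ≤ cols - 1 → (f : Int) = cols - 1 - c →
      ∃ n ≤ 4 ^ f, ∀ F,
        runB rows cols ((r, c) :: rest) g (n + F) =
          (if (dfsA rows cols r c g f).1 ≠ 0 then (1, (dfsA rows cols r c g f).2)
           else runB rows cols rest (dfsA rows cols r c g f).2 F) := by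
  intro f
  induction f with
  | zero =>
    intro r c g rest hr hc hcle hf
    have hceq : c = cols - 1 := by omega
    refine ⟨1, by norm_num, fun F => ?_⟩
    have hdfs : dfsA rows cols r c g 0 = (1, gset g r c "x") := by
      rw [dfsA, if_pos hceq]
    rw [show 1 + F = F + 1 by omega, runB, hdfs]
    simp only []
    rw [if_pos hceq]
    norm_num
  | succ f ihf =>
    intro r c g rest hr hc hcle hf
    by_cases hceq : c = cols - 1
    · refine ⟨1, Nat.one_le_pow _ _ (by norm_num), fun F => ?_⟩
      have hdfs : dfsA rows cols r c g (f + 1) = (1, gset g r c "x") := by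
        rw [dfsA, if_pos hceq]
      rw [show 1 + F = F + 1 by omega, runB, hdfs]
      simp only []
      rw [if_pos hceq]
      norm_num
    · have hclt : c < cols - 1 := by omega
      obtain ⟨n, hn, H⟩ := runB_go_sim rows cols f ihf [-1, 0, 1] r c
        (gset g r c "x") rest (by decide) hc hclt (by omega)
      refine ⟨1 + n, ?_, fun F => ?_⟩
      · have h1 : 1 ≤ 4 ^ f := Nat.one_le_pow _ _ (by norm_num)
        have h3 : n ≤ 3 * 4 ^ f := by simpa using hn
        calc 1 + n ≤ 4 ^ f + 3 * 4 ^ f := by omega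
        _ = 4 ^ (f + 1) := by ring
      · have hdfs : dfsA rows cols r c g (f + 1)
            = goA rows cols r c [-1, 0, 1] (gset g r c "x") f := by
          rw [dfsA, if_neg hceq]
        have hmap : [r - 1, r, r + 1] = ([-1, 0, 1] : List Int).map (fun dr => r + dr) := by
          simp only [List.map_cons, List.map_nil,
            show r + (-1 : Int) = r - 1 from by ring, show r + (0 : Int) = r from by ring]
        rw [show 1 + n + F = (n + F) + 1 by omega, runB]
        simp only []
        rw [if_neg hceq, hmap, List.filterMap_map]
        rw [show ((fun dr =>
            if 0 ≤ r + dr ∧ r + dr < rows ∧ gget (gset g r c "x") (r + dr) (c + 1) ≠ "x"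
            then some (r + dr, c + 1) else none) : Int → Option (Int × Int))
          = ((fun nr => if 0 ≤ nr ∧ nr < rows ∧ gget (gset g r c "x") nr (c + 1) ≠ "x"
            then some (nr, c + 1) else none) ∘ (fun dr => r + dr)) from rfl] at H
        rw [H F, hdfs]

theorem fold_sim (rows cols : Int) (hcols : 1 ≤ cols) :
    ∀ (l : List Int), (∀ r ∈ l, 0 ≤ r) → ∀ (st : Int × List (List String)),
      l.foldl (fun st r =>
          let p := dfsA rows cols r 0 st.2 ((cols - 1).toNat)
          (st.1 + p.1, p.2)) st
        = l.foldl (fun st r =>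
          let p := runB rows cols [(r, 0)] st.2 (4 ^ (cols - 1).toNat)
          (st.1 + p.1, p.2)) st := by
  intro l
  induction l with
  | nil => intro _ st; rfl
  | cons r t ih =>
    intro hmem st
    simp only [List.foldl_cons]
    obtain ⟨n, hn, H⟩ := runB_sim rows cols ((cols - 1).toNat) r 0 st.2 []
      (hmem r (List.mem_cons_self)) le_rfl (by omega)
      (by rw [Int.toNat_of_nonneg (by omega)]; ring)
    have hrun : runB rows cols [(r, 0)] st.2 (4 ^ (cols - 1).toNat)
        = (if (dfsA rows cols r 0 st.2 ((cols - 1).toNat)).1 ≠ 0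
           then (1, (dfsA rows cols r 0 st.2 ((cols - 1).toNat)).2)
           else (0, (dfsA rows cols r 0 st.2 ((cols - 1).toNat)).2)) := by
      rw [show 4 ^ (cols - 1).toNat = n + (4 ^ (cols - 1).toNat - n) by omega, H,
        runB_nil]
    rw [hrun]
    rcases dfsA_01 rows cols ((cols - 1).toNat) r 0 st.2 with h01 | h01
    · rw [if_neg (fun h => h h01)]
      simp only [h01]
      exact ih (fun x hx => hmem x (List.mem_cons_of_mem _ hx)) _
    · rw [if_pos (by rw [h01]; exact one_ne_zero)]
      simp only [h01]
      exact ih (fun x hx => hmem x (List.mem_cons_of_mem _ hx)) _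

-- ===== VERDICT (by name: the statement is the Claim_ definition above) =====
theorem solution_spec : Claim_equal_solution := by
  intro rows cols grid _ hpre
  show solution rows cols grid = solution_alt rows cols grid
  unfold solution solution_alt
  by_cases hrows : 0 < rows
  · rw [fold_sim rows cols (hpre hrows).1 _
      (fun r hr => ((PySem.List.mem_pyRange_one).mp hr).1)]
  · rw [PySem.List.pyRange_one_eq_nil (by omega)]
    rfl
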